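-- pv_equiv track=rewrite | github.com/Fadiabdf/Articulation-points-finder | PVC/tsp_algorithms.py | kruskal_tsp
-- ===== SOURCE A (Python) =====
-- from collections import defaultdict
--
-- def kruskal_tsp(dist_matrix):
--     """
--     Approximates the TSP using Kruskal's MST algorithm.
--
--     Parameters:
--         dist_matrix (list of list of int): Distance matrix of the cities.
--
--     Returns:
--         tuple: Approximate cycle and its cost.
--     """
--     n = len(dist_matrix)
--
--     # Step 1: Prepare edges for Kruskal's algorithm
--     edges = []
--     for i in range(n):
--         for j in range(i + 1, n):
--             edges.append((dist_matrix[i][j], i, j))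
--     edges.sort()  # Sort edges by weight
--
--     # Step 2: Union-Find to construct MST
--     parent = list(range(n))
--     rank = [0] * n
--
--     def find(x):
--         if parent[x] != x:
--             parent[x] = find(parent[x])
--         return parent[x]
--
--     def union(x, y):
--         root_x, root_y = find(x), find(y)
--         if root_x != root_y:
--             if rank[root_x] > rank[root_y]:
--                 parent[root_y] = root_x
--             elif rank[root_x] < rank[root_y]:
--                 parent[root_x] = root_y
--             else:
--                 parent[root_y] = root_x
--                 rank[root_x] += 1
--
--     mst_edges = []
--     for weight, u, v in edges:
--         if find(u) != find(v):
--             union(u, v)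
--             mst_edges.append((u, v))
--
--     # Step 3: Traverse MST to form an approximate tour
--     adj_list = defaultdict(list)
--     for u, v in mst_edges:
--         adj_list[u].append(v)
--         adj_list[v].append(u)
--
--     visited = [False] * n
--     tour = []
--
--     def preorder(node):
--         visited[node] = True
--         tour.append(node)
--         for neighbor in adj_list[node]:
--             if not visited[neighbor]:
--                 preorder(neighbor)
--
--     preorder(0)  # Start traversal from node 0
--     tour.append(0)  # Return to the starting city
--     cost = sum(dist_matrix[tour[i]][tour[i + 1]] for i in range(len(tour) - 1))
--
--     return tour, cost
-- ===== SOURCE B (Python) =====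
-- def kruskal_tsp(dist_matrix):
--     """
--     Approximates the TSP using Kruskal's MST algorithm.
--
--     Same task as the original, but Kruskal's connectivity test uses a flat
--     component-label array (merging relabels one component) instead of a
--     union-find forest, and the preorder MST walk is an explicit stack-based
--     iterative DFS instead of recursion.
--     """
--     n = len(dist_matrix)
--
--     # edges as a sorted comprehension
--     edges = sorted((dist_matrix[i][j], i, j)
--                    for i in range(n) for j in range(i + 1, n))
--
--     # Kruskal with component labels: comp[x] is the label of x's component;
--     # accepting an edge relabels the whole component of v with u's label
--     comp = list(range(n))
--     mst_edges = []
--     for w, u, v in edges: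
--         cu, cv = comp[u], comp[v]
--         if cu != cv:
--             mst_edges.append((u, v))
--             comp = [cu if c == cv else c for c in comp]
--
--     # adjacency lists indexed by node
--     adj_list = [[] for _ in range(n)]
--     for u, v in mst_edges:
--         adj_list[u].append(v)
--         adj_list[v].append(u)
--
--     # iterative preorder DFS with an explicit stack
--     visited = [False] * n
--     tour = []
--     stack = [0]
--     while stack:
--         node = stack.pop()
--         if visited[node]:
--             continue
--         visited[node] = True
--         tour.append(node)
--         stack.extend(reversed(adj_list[node]))
--
--     tour.append(0)
--     cost = sum(dist_matrix[u][v] for u, v in zip(tour, tour[1:]))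
--     return tour, cost
-- ===== Notes on version B (the rewrite author's own statement) =====
-- stated objective: alternative
-- what changed: Kruskal's union-find forest (recursive find with path compression, union by rank) is replaced by a flat component-label array whose merge relabels one component in a comprehension, the recursive preorder DFS is replaced by an explicit stack-based iterative DFS, edges are built as a sorted comprehension, and the cost is summed over zip(tour, tour[1:]).
-- outside the precondition, e.g. on kruskal_tsp([[0, 1], [1]]): A returns ([0, 1, 0], 2), B returns ([0, 1, 0], 2)
import Mathlib
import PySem

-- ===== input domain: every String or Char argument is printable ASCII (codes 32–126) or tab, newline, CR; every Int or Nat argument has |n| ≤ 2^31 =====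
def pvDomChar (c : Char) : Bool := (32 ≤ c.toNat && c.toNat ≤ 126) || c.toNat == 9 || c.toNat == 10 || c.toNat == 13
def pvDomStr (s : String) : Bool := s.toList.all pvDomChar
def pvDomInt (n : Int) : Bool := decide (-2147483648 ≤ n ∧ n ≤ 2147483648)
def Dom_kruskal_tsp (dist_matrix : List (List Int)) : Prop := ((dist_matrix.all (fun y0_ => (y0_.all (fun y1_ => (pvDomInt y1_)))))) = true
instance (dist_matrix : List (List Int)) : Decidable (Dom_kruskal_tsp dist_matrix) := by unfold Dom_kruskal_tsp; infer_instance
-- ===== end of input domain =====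

-- B replaces A's union-find forest (recursive find with path compression, union by rank) by a
-- flat component-label array relabelled on each merge, and the recursive preorder DFS by an
-- explicit stack-based iterative DFS; edges are a sorted comprehension and the cost is summed
-- over zipped consecutive pairs (objective: alternative; same asymptotic cost).

-- dist_matrix[a][b]; every access made by either Python is in range on Pre_, so getD is exact there
def pvW (dm : List (List Int)) (a b : Nat) : Int := (dm.getD a []).getD b 0

-- setting a false entry to true strictly lowers the number of false entries (termination measure,
-- cited by both ports' DFS)
theorem pvCountFalseSetTrue : ∀ (v : List Bool) (n : Nat), v.getD n true = false →
    (v.set n true).count false < v.count false := by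
  intro v
  induction v with
  | nil => intro n h; simp at h
  | cons b t ih =>
    intro n h
    cases n with
    | zero =>
      simp [List.getD] at h
      subst h
      simp [List.count_cons]
    | succ m =>
      have := ih m (by simpa [List.getD] using h)
      simpa [List.count_cons] using this

-- ===== PORT A =====
-- A's recursive `find` with path compression; fuel = number of nodes is enough, since the
-- parent chain visits distinct nodes (fuel never runs out on inputs in Pre_)
def pvFind : Nat → List Nat → Nat → List Nat × Nat
  | 0, parent, x => (parent, x)
  | fuel + 1, parent, x =>
    let p := parent.getD x x
    if p ≠ x then
      let r := pvFind fuel parent p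
      (r.1.set x r.2, r.2)
    else (parent, x)

-- A's `union` by rank
def pvUnion (parent rank : List Nat) (x y : Nat) : List Nat × List Nat :=
  let f1 := pvFind parent.length parent x
  let f2 := pvFind f1.1.length f1.1 y
  let rx := f1.2
  let ry := f2.2
  let par := f2.1
  if rx ≠ ry then
    if rank.getD rx 0 > rank.getD ry 0 then (par.set ry rx, rank)
    else if rank.getD rx 0 < rank.getD ry 0 then (par.set rx ry, rank)
    else (par.set ry rx, rank.set rx (rank.getD rx 0 + 1))
  else (par, rank)

-- the body of A's Kruskal loop: state = (parent, rank, mst_edges)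
def pvMSTstep (st : List Nat × List Nat × List (Nat × Nat)) (e : Int × Nat × Nat) :
    List Nat × List Nat × List (Nat × Nat) :=
  let u := e.2.1
  let v := e.2.2
  let f1 := pvFind st.1.length st.1 u
  let f2 := pvFind f1.1.length f1.1 v
  if f1.2 ≠ f2.2 then
    let pr := pvUnion f2.1 st.2.1 u v
    (pr.1, pr.2, st.2.2 ++ [(u, v)])
  else (f2.1, st.2.1, st.2.2)

-- A's Kruskal MST loop over the sorted edges, via union-find
def pvMST (edges : List (Int × Nat × Nat)) (n : Nat) : List (Nat × Nat) :=
  (edges.foldl pvMSTstep (List.range n, List.replicate n 0, [])).2.2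

-- adjacency lists of the MST; A's defaultdict(list) only ever holds keys 0..n-1, so a
-- length-n table of lists (B's literal representation) is exact for both
def pvAdj (n : Nat) (mst : List (Nat × Nat)) : List (List Nat) :=
  mst.foldl
    (fun adj uv =>
      let adj1 := adj.set uv.1 (adj.getD uv.1 [] ++ [uv.2])
      adj1.set uv.2 (adj1.getD uv.2 [] ++ [uv.1]))
    (List.replicate n [])

-- A's recursive `preorder`, with the pending recursive calls as the list argument `ns`:
-- `preorder(node)` = process [node]; the `if not visited[neighbor]` guard is checked right
-- before each recursive call, i.e. when the neighbour reaches the head of `ns`.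
-- The result carries the (proof-only) facts needed for well-founded termination.
def pvPreorder (adj : List (List Nat)) : (ns : List Nat) → (v : List Bool) → (t : List Nat) →
    {p : List Bool × List Nat // p.1.count false ≤ v.count false}
  | [], v, t => ⟨(v, t), le_refl _⟩
  | n :: rest, v, t =>
    if h : v.getD n true = false then
      let r1 := pvPreorder adj (adj.getD n []) (v.set n true) (t ++ [n])
      let r2 := pvPreorder adj rest r1.1.1 r1.1.2
      ⟨r2.1, le_trans r2.2 (le_trans r1.2 (Nat.le_of_lt (pvCountFalseSetTrue v n h)))⟩
    else
      pvPreorder adj rest v t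
termination_by ns v t => (v.count false, ns.length)
decreasing_by
  · exact Prod.Lex.left _ _ (pvCountFalseSetTrue v n h)
  · rcases Nat.lt_or_eq_of_le (le_trans r1.2 (Nat.le_of_lt (pvCountFalseSetTrue v n h))) with hlt | heq
    · exact Prod.Lex.left _ _ hlt
    · rw [heq]; exact Prod.Lex.right _ (by simp)
  · exact Prod.Lex.right _ (by simp)

def kruskal_tsp (dist_matrix : List (List Int)) : List Int × Int :=
  let n := dist_matrix.length
  -- nested append loops; then edges.sort().  Python sorts the (weight, i, j) tuples, but the
  -- build order is already lexicographic in (i, j) and all (i, j) are distinct, so the stable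
  -- sort by weight alone produces exactly Python's tuple order.
  let edges0 := (List.range n).foldl
    (fun es i => (List.range' (i + 1) (n - (i + 1))).foldl
      (fun es j => es ++ [(pvW dist_matrix i j, i, j)]) es) []
  let edges := PySem.List.sorted edges0 (fun e => e.1) false
  let mst := pvMST edges n
  let adj := pvAdj n mst
  let tour := (pvPreorder adj [0] (List.replicate n false) []).1.2 ++ [0]
  (tour.map (fun x => Int.ofNat x),
   (List.range (tour.length - 1)).foldl
     (fun acc i => acc + pvW dist_matrix (tour.getD i 0) (tour.getD (i + 1) 0)) 0)

-- ===== PORT B =====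
-- the body of B's Kruskal loop: state = (comp, mst_edges); a merge relabels v's component
def pvMSTBstep (st : List Nat × List (Nat × Nat)) (e : Int × Nat × Nat) :
    List Nat × List (Nat × Nat) :=
  let cu := st.1.getD e.2.1 0
  let cv := st.1.getD e.2.2 0
  if cu ≠ cv then
    (st.1.map (fun c => if c = cv then cu else c), st.2 ++ [(e.2.1, e.2.2)])
  else st

-- B's Kruskal MST loop, via component labels
def pvMSTB (edges : List (Int × Nat × Nat)) (n : Nat) : List (Nat × Nat) :=
  (edges.foldl pvMSTBstep (List.range n, [])).2

-- B's iterative DFS.  Python keeps the stack in a list popped from the END and pushes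
-- `reversed(adj[node])`; with the head of the Lean list as the top of the stack that is
-- exactly `adj[node] ++ stack`.
def pvDfsIter (adj : List (List Nat)) : (stack : List Nat) → (v : List Bool) → (t : List Nat) →
    List Bool × List Nat
  | [], v, t => (v, t)
  | n :: stack, v, t =>
    if hv : v.getD n true then pvDfsIter adj stack v t
    else pvDfsIter adj (adj.getD n [] ++ stack) (v.set n true) (t ++ [n])
termination_by stack v t => (v.count false, stack.length)
decreasing_by
  · exact Prod.Lex.right _ (by simp)
  · exact Prod.Lex.left _ _ (pvCountFalseSetTrue v n (Bool.eq_false_iff.mpr hv ▸ rfl))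

def kruskal_tsp_alt (dist_matrix : List (List Int)) : List Int × Int :=
  let n := dist_matrix.length
  -- sorted comprehension (stable sort by weight = Python's tuple sort, as in port A)
  let edges := PySem.List.sorted
    ((List.range n).flatMap
      (fun i => (List.range' (i + 1) (n - (i + 1))).map (fun j => (pvW dist_matrix i j, i, j))))
    (fun e => e.1) false
  let mst := pvMSTB edges n
  let adj := pvAdj n mst
  let tour := (pvDfsIter adj [0] (List.replicate n false) []).2 ++ [0]
  (tour.map (fun x => Int.ofNat x),
   (tour.zip (tour.drop 1)).foldl (fun acc p => acc + pvW dist_matrix p.1 p.2) 0)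

-- ===== PRECONDITION & SPEC =====
-- Pre_ excludes the empty matrix (A's visited[0] raises IndexError) and ragged matrices with a
-- row shorter than n: on those A's dist_matrix[i][j] accesses may raise IndexError, and on the
-- ragged ones where every accessed entry happens to exist A still returns (B returns the same
-- value there, but the square shape is the function's natural domain).
def Pre_kruskal_tsp (dist_matrix : List (List Int)) : Prop :=
  dist_matrix ≠ [] ∧ ∀ row ∈ dist_matrix, dist_matrix.length ≤ row.length
instance (dist_matrix : List (List Int)) : Decidable (Pre_kruskal_tsp dist_matrix) := by
  unfold Pre_kruskal_tsp; infer_instance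
def pvWitness_kruskal_tsp : List (List Int) := [[0, 3], [3, 0]]

def Spec_kruskal_tsp (dist_matrix : List (List Int)) (out : List Int × Int) : Prop := out = kruskal_tsp_alt dist_matrix
instance (dist_matrix : List (List Int)) (out : List Int × Int) : Decidable (Spec_kruskal_tsp dist_matrix out) := by unfold Spec_kruskal_tsp; infer_instance

-- ===== CLAIM (what is proved, stated in full; the proofs are below) =====
def Claim_equal_kruskal_tsp : Prop := ∀ (dist_matrix : List (List Int)), Dom_kruskal_tsp dist_matrix → Pre_kruskal_tsp dist_matrix → Spec_kruskal_tsp dist_matrix (kruskal_tsp dist_matrix)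

-- ===== LEMMAS AND PROOFS =====

-- ---------- semantics of the union-find forest ----------

-- x reaches root r by following parent pointers
inductive pvReach (p : List Nat) : Nat → Nat → Prop
  | root (x : Nat) : p.getD x x = x → pvReach p x x
  | step (x r : Nat) : p.getD x x ≠ x → pvReach p (p.getD x x) r → pvReach p x r

-- the same, counting the steps
inductive pvReachK (p : List Nat) : Nat → Nat → Nat → Prop
  | root (x : Nat) : p.getD x x = x → pvReachK p x x 0
  | step (x r k : Nat) : p.getD x x ≠ x → pvReachK p (p.getD x x) r k → pvReachK p x r (k + 1)

-- forest invariant: length n, pointers below n, every node reaches a root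
def pvFr (p : List Nat) (n : Nat) : Prop :=
  p.length = n ∧ (∀ z, z < n → p.getD z z < n) ∧ (∀ z, z < n → ∃ r, pvReach p z r)

-- the two nodes z and w lie in the same tree
def pvRootEq (p : List Nat) (z w : Nat) : Prop := ∃ s, pvReach p z s ∧ pvReach p w s

theorem pvReach_unique {p : List Nat} {x r r' : Nat}
    (h : pvReach p x r) (h' : pvReach p x r') : r = r' := by
  induction h with
  | root x hx =>
    cases h' with
    | root _ _ => rfl
    | step _ _ hne _ => exact absurd hx hne
  | step x r hne hrec ih =>
    cases h' with
    | root _ hx => exact absurd hx hne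
    | step _ _ _ h2 => exact ih h2

theorem pvReach_isRoot {p : List Nat} {x r : Nat} (h : pvReach p x r) :
    p.getD r r = r := by
  induction h with
  | root _ hx => exact hx
  | step _ _ _ _ ih => exact ih

theorem pvReach_lt {p : List Nat} {n x r : Nat} (hp : ∀ z, z < n → p.getD z z < n)
    (h : pvReach p x r) (hx : x < n) : r < n := by
  induction h with
  | root _ _ => exact hx
  | step y r hne hrec ih => exact ih (hp y hx)

theorem pvReachK_reach {p : List Nat} {x r k : Nat} (h : pvReachK p x r k) : pvReach p x r := by
  induction h with
  | root x hx => exact pvReach.root x hx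
  | step x r k hne _ ih => exact pvReach.step x r hne ih

theorem pvReach_reachK {p : List Nat} {x r : Nat} (h : pvReach p x r) :
    ∃ k, pvReachK p x r k := by
  induction h with
  | root x hx => exact ⟨0, pvReachK.root x hx⟩
  | step x r hne _ ih => exact ⟨ih.choose + 1, pvReachK.step x r _ hne ih.choose_spec⟩

-- ---------- the chain to the root is short: k < n ----------

def pvIter (p : List Nat) : Nat → Nat → Nat
  | 0, x => x
  | k + 1, x => pvIter p k (p.getD x x)

theorem pvIter_add (p : List Nat) (a b x : Nat) :
    pvIter p (a + b) x = pvIter p b (pvIter p a x) := by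
  induction a generalizing x with
  | zero => simp [pvIter]
  | succ a ih =>
    have : a + 1 + b = (a + b) + 1 := by omega
    rw [this]
    show pvIter p (a + b) (p.getD x x) = _
    rw [ih (p.getD x x)]
    rfl

theorem pvIter_lt {p : List Nat} {n : Nat} (hp : ∀ z, z < n → p.getD z z < n) :
    ∀ k x, x < n → pvIter p k x < n := by
  intro k
  induction k with
  | zero => intro x hx; exact hx
  | succ k ih => intro x hx; exact ih (p.getD x x) (hp x hx)

theorem pvReachK_iter {p : List Nat} {x r k : Nat} (h : pvReachK p x r k) :
    pvIter p k x = r := by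
  induction h with
  | root x hx => rfl
  | step x r k hne _ ih => exact ih

-- build a counted reach from the first root on the iteration chain
theorem pvReachK_of_iter {p : List Nat} :
    ∀ k x, (∀ j, j < k → p.getD (pvIter p j x) (pvIter p j x) ≠ pvIter p j x) →
    p.getD (pvIter p k x) (pvIter p k x) = pvIter p k x →
    pvReachK p x (pvIter p k x) k := by
  intro k
  induction k with
  | zero => intro x _ hroot; exact pvReachK.root x hroot
  | succ k ih =>
    intro x hmin hroot
    have h0 : p.getD x x ≠ x := hmin 0 (Nat.succ_pos k)
    refine pvReachK.step x _ k h0 ?_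
    exact ih (p.getD x x) (fun j hj => hmin (j + 1) (by omega)) hroot

-- under the forest invariant the chain from any node reaches its root in fewer than n steps
theorem pvDepth_lt {p : List Nat} {n x : Nat} (hFr : pvFr p n) (hx : x < n) :
    ∃ r k, pvReachK p x r k ∧ k < n := by
  obtain ⟨hlen, hlt, hreach⟩ := hFr
  obtain ⟨r0, hr0⟩ := hreach x hx
  obtain ⟨k0, hk0⟩ := pvReach_reachK hr0
  have hiter0 : pvIter p k0 x = r0 := pvReachK_iter hk0
  have hrootk0 : p.getD (pvIter p k0 x) (pvIter p k0 x) = pvIter p k0 x := by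
    rw [hiter0]; exact pvReach_isRoot hr0
  -- minimal index with a root
  have hex : ∃ k, p.getD (pvIter p k x) (pvIter p k x) = pvIter p k x := ⟨k0, hrootk0⟩
  classical
  let k := Nat.find hex
  have hkroot : p.getD (pvIter p k x) (pvIter p k x) = pvIter p k x := Nat.find_spec hex
  have hkmin : ∀ j, j < k → p.getD (pvIter p j x) (pvIter p j x) ≠ pvIter p j x :=
    fun j hj => Nat.find_min hex hj
  have hkK : pvReachK p x (pvIter p k x) k := pvReachK_of_iter k x hkmin hkroot
  refine ⟨pvIter p k x, k, hkK, ?_⟩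
  -- the chain x, p x, …, pvIter p k x has k+1 distinct members, all < n
  by_contra hnk
  push_neg at hnk
  -- injectivity of i ↦ pvIter p i x on Fin (k+1)
  have hinj : Function.Injective (fun i : Fin (k + 1) => (⟨pvIter p i.1 x, pvIter_lt hlt i.1 x hx⟩ : Fin n)) := by
    intro i j hij
    simp only [Fin.mk.injEq] at hij
    by_contra hne
    -- wlog i < j
    rcases Nat.lt_or_ge i.1 j.1 with hlt' | hge
    · have heq : ∀ t, pvIter p (i.1 + t) x = pvIter p (j.1 + t) x := by
        intro t
        rw [pvIter_add, pvIter_add, hij]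
      have hroot' : p.getD (pvIter p (i.1 + (k - j.1)) x) (pvIter p (i.1 + (k - j.1)) x)
          = pvIter p (i.1 + (k - j.1)) x := by
        rw [heq (k - j.1)]
        have : j.1 + (k - j.1) = k := by omega
        rw [this]; exact hkroot
      have : i.1 + (k - j.1) < k := by omega
      exact hkmin _ this hroot'
    · have hlt'' : j.1 < i.1 := by
        rcases Nat.lt_or_ge j.1 i.1 with h | h
        · exact h
        · exact absurd (Fin.ext (Nat.le_antisymm h hge)) hne
      have heq : ∀ t, pvIter p (j.1 + t) x = pvIter p (i.1 + t) x := by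
        intro t
        rw [pvIter_add, pvIter_add, hij]
      have hroot' : p.getD (pvIter p (j.1 + (k - i.1)) x) (pvIter p (j.1 + (k - i.1)) x)
          = pvIter p (j.1 + (k - i.1)) x := by
        rw [heq (k - i.1)]
        have : i.1 + (k - i.1) = k := by omega
        rw [this]; exact hkroot
      have : j.1 + (k - i.1) < k := by omega
      exact hkmin _ this hroot'
  have hcard := Fintype.card_le_of_injective _ hinj
  simp only [Fintype.card_fin] at hcard
  omega

-- ---------- preservation of roots under the pointer updates ----------

-- getD after set, off and on the written index
theorem pvGetD_set_ne (p : List Nat) (a r z : Nat) (hz : z ≠ a) :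
    (p.set a r).getD z z = p.getD z z := by
  rcases Nat.lt_or_ge z p.length with h | h
  · rw [List.getD_eq_getElem?_getD, List.getD_eq_getElem?_getD,
      List.getElem?_set_ne (fun h' => hz h'.symm)]
  · rw [List.getD_eq_getElem?_getD, List.getD_eq_getElem?_getD,
      List.getElem?_eq_none_iff.mpr (by simpa using h),
      List.getElem?_eq_none_iff.mpr (by simpa using h)]

theorem pvGetD_set_self (p : List Nat) (a r : Nat) (h : a < p.length) :
    (p.set a r).getD a a = r := by
  rw [List.getD_eq_getElem?_getD, List.getElem?_set_self h]
  rfl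

-- pointing a node straight at its own root changes no node's root (forward direction)
theorem pvSetRoot_fwd {p : List Nat} {a r : Nat} (halen : a < p.length)
    (har : pvReach p a r) : ∀ z s, pvReach p z s → pvReach (p.set a r) z s := by
  intro z s h
  induction h with
  | root x hx =>
    by_cases hxa : x = a
    · subst hxa
      have hr : r = x := pvReach_unique har (pvReach.root x hx)
      subst hr
      exact pvReach.root r (by rw [pvGetD_set_self p r r halen])
    · exact pvReach.root x (by rw [pvGetD_set_ne p a r x hxa]; exact hx)
  | step x s hne hrec ih =>
    by_cases hxa : x = a
    · subst hxa
      have hs : s = r := pvReach_unique (pvReach.step x s hne hrec) har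
      subst hs
      have hrx : s ≠ x := by
        intro h
        have hr := pvReach_isRoot (pvReach.step x s hne hrec)
        rw [h] at hr
        exact hne hr
      refine pvReach.step x s ?_ ?_
      · rw [pvGetD_set_self p x s halen]; exact hrx
      · rw [pvGetD_set_self p x s halen]
        exact pvReach.root s (by rw [pvGetD_set_ne p x s s hrx]; exact pvReach_isRoot hrec)
    · exact pvReach.step x s (by rw [pvGetD_set_ne p a r x hxa]; exact hne)
        (by rw [pvGetD_set_ne p a r x hxa]; exact ih)

-- pointing a node straight at its own root changes no node's root
theorem pvSetRoot_reach {p : List Nat} {n a r : Nat} (hFr : pvFr p n) (ha : a < n)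
    (har : pvReach p a r) :
    ∀ z s, z < n → (pvReach p z s ↔ pvReach (p.set a r) z s) := by
  obtain ⟨hlen, hlt, hreach⟩ := hFr
  have halen : a < p.length := by omega
  intro z s hz
  constructor
  · exact pvSetRoot_fwd halen har z s
  · intro h
    obtain ⟨s0, hs0⟩ := hreach z hz
    have h0 : pvReach (p.set a r) z s0 := pvSetRoot_fwd halen har z s0 hs0
    have : s = s0 := pvReach_unique h h0
    subst this
    exact hs0

theorem pvSetRoot_Fr {p : List Nat} {n a r : Nat} (hFr : pvFr p n) (ha : a < n)
    (har : pvReach p a r) : pvFr (p.set a r) n := by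
  obtain ⟨hlen, hlt, hreach⟩ := hFr
  have hrlt : r < n := pvReach_lt hlt har ha
  refine ⟨by simpa using hlen, ?_, ?_⟩
  · intro z hz
    by_cases hza : z = a
    · subst hza
      rw [pvGetD_set_self p z r (by omega)]
      exact hrlt
    · rw [pvGetD_set_ne p a r z hza]
      exact hlt z hz
  · intro z hz
    obtain ⟨s, hs⟩ := hreach z hz
    exact ⟨s, (pvSetRoot_reach ⟨hlen, hlt, hreach⟩ ha har z s hz).1 hs⟩

-- ---------- find: returns the root, compresses, preserves everything ----------

theorem pvFind_spec :
    ∀ (fuel : Nat) {p : List Nat} {n x r k : Nat}, pvFr p n → x < n →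
    pvReachK p x r k → k < fuel →
    (pvFind fuel p x).2 = r ∧ (pvFind fuel p x).1.length = p.length ∧
    pvFr (pvFind fuel p x).1 n ∧
    (∀ z s, z < n → (pvReach p z s ↔ pvReach (pvFind fuel p x).1 z s)) := by
  intro fuel
  induction fuel with
  | zero => intro p n x r k _ _ _ hk; omega
  | succ fuel ih =>
    intro p n x r k hFr hx hK hk
    by_cases hne : p.getD x x ≠ x
    · have heq : pvFind (fuel + 1) p x =
          ((pvFind fuel p (p.getD x x)).1.set x (pvFind fuel p (p.getD x x)).2,
           (pvFind fuel p (p.getD x x)).2) := by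
        rw [pvFind]
        simp only [if_pos hne]
      cases hK with
      | root _ hx' => exact absurd hx' hne
      | step _ _ k' hne' hK' =>
        have hpx : p.getD x x < n := hFr.2.1 x hx
        obtain ⟨hr2, hlen2, hFr2, hpres2⟩ := ih hFr hpx hK' (by omega)
        have hreach_r : pvReach (pvFind fuel p (p.getD x x)).1 x
            ((pvFind fuel p (p.getD x x)).2) := by
          have h1 : pvReach p x r := pvReachK_reach (pvReachK.step x r k' hne' hK')
          rw [hr2]
          exact (hpres2 x r hx).1 h1
        have hFr3 := pvSetRoot_Fr hFr2 hx hreach_r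
        have hpres3 := pvSetRoot_reach hFr2 hx hreach_r
        rw [heq]
        refine ⟨hr2, by simpa using hlen2, hFr3, ?_⟩
        intro z s hz
        exact (hpres2 z s hz).trans (hpres3 z s hz)
    · have heq : pvFind (fuel + 1) p x = (p, x) := by
        rw [pvFind]
        simp only [if_neg hne]
      push_neg at hne
      cases hK with
      | root _ _ => rw [heq]; exact ⟨rfl, rfl, hFr, fun z s hz => Iff.rfl⟩
      | step _ _ k' hne' _ => exact absurd hne hne'

-- convenient wrapper: find with fuel = n on a forest of size n
theorem pvFind_n {p : List Nat} {n x r : Nat} (hFr : pvFr p n) (hx : x < n)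
    (hr : pvReach p x r) :
    (pvFind p.length p x).2 = r ∧ (pvFind p.length p x).1.length = p.length ∧
    pvFr (pvFind p.length p x).1 n ∧
    (∀ z s, z < n → (pvReach p z s ↔ pvReach (pvFind p.length p x).1 z s)) := by
  obtain ⟨r0, k, hK, hkn⟩ := pvDepth_lt hFr hx
  have hr0 : r0 = r := pvReach_unique (pvReachK_reach hK) hr
  subst hr0
  have hlen : p.length = n := hFr.1
  exact pvFind_spec p.length hFr hx hK (by omega)

-- ---------- linking one root under another ----------

-- linking root b under root a: forward reach transfer
theorem pvLink_fwd {p : List Nat} {a b : Nat} (hblen : b < p.length)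
    (hra : p.getD a a = a) (hrb : p.getD b b = b) (hab : a ≠ b) :
    ∀ z s, pvReach p z s →
      (s ≠ b → pvReach (p.set b a) z s) ∧ (s = b → pvReach (p.set b a) z a) := by
  intro z s h
  induction h with
  | root x hx =>
    constructor
    · intro hsb
      exact pvReach.root x (by rw [pvGetD_set_ne p b a x hsb]; exact hx)
    · intro hsb
      subst hsb
      refine pvReach.step x a ?_ ?_
      · rw [pvGetD_set_self p x a hblen]; exact hab
      · rw [pvGetD_set_self p x a hblen]
        exact pvReach.root a (by rw [pvGetD_set_ne p x a a hab]; exact hra)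
  | step x s hne hrec ih =>
    have hxb : x ≠ b := by
      intro h
      subst h
      exact hne hrb
    constructor
    · intro hsb
      exact pvReach.step x s (by rw [pvGetD_set_ne p b a x hxb]; exact hne)
        (by rw [pvGetD_set_ne p b a x hxb]; exact ih.1 hsb)
    · intro hsb
      exact pvReach.step x a (by rw [pvGetD_set_ne p b a x hxb]; exact hne)
        (by rw [pvGetD_set_ne p b a x hxb]; exact ih.2 hsb)

-- linking root b under root a: backward reach transfer
theorem pvLink_bwd {p : List Nat} {a b : Nat} (hblen : b < p.length)
    (hra : p.getD a a = a) (hrb : p.getD b b = b) (hab : a ≠ b) :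
    ∀ z s, pvReach (p.set b a) z s →
      (pvReach p z s ∧ s ≠ b) ∨ (pvReach p z b ∧ s = a) := by
  intro z s h
  induction h with
  | root x hx =>
    have hxb : x ≠ b := by
      intro h
      subst h
      rw [pvGetD_set_self p x a hblen] at hx
      exact hab hx
    rw [pvGetD_set_ne p b a x hxb] at hx
    exact Or.inl ⟨pvReach.root x hx, hxb⟩
  | step x s hne hrec ih =>
    by_cases hxb : x = b
    · subst hxb
      rw [pvGetD_set_self p x a hblen] at ih
      rcases ih with ⟨hps, _⟩ | ⟨hpb, _⟩
      · have hsa : s = a := pvReach_unique hps (pvReach.root a hra)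
        exact Or.inr ⟨pvReach.root x hrb, hsa⟩
      · have : x = a := pvReach_unique hpb (pvReach.root a hra)
        exact absurd this.symm hab
    · rw [pvGetD_set_ne p b a x hxb] at hne ih
      rcases ih with ⟨hps, hsb⟩ | ⟨hpb, hsa⟩
      · exact Or.inl ⟨pvReach.step x s hne hps, hsb⟩
      · exact Or.inr ⟨pvReach.step x b hne hpb, hsa⟩

-- linking preserves the forest invariant
theorem pvLink_Fr {p : List Nat} {n a b : Nat} (hFr : pvFr p n) (ha : a < n) (hb : b < n)
    (hra : p.getD a a = a) (hrb : p.getD b b = b) (hab : a ≠ b) : pvFr (p.set b a) n := by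
  obtain ⟨hlen, hlt, hreach⟩ := hFr
  have hblen : b < p.length := by omega
  refine ⟨by simpa using hlen, ?_, ?_⟩
  · intro z hz
    by_cases hzb : z = b
    · subst hzb
      rw [pvGetD_set_self p z a (by omega)]
      exact ha
    · rw [pvGetD_set_ne p b a z hzb]
      exact hlt z hz
  · intro z hz
    obtain ⟨s, hs⟩ := hreach z hz
    by_cases hsb : s = b
    · subst hsb
      exact ⟨a, (pvLink_fwd hblen hra hrb hab z s hs).2 rfl⟩
    · exact ⟨s, (pvLink_fwd hblen hra hrb hab z s hs).1 hsb⟩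

-- z and u share a tree iff z reaches u's root
theorem pvRootEq_iff_reach {p : List Nat} {u ru : Nat} (hu : pvReach p u ru) (z : Nat) :
    pvRootEq p z u ↔ pvReach p z ru := by
  constructor
  · rintro ⟨s, hz, hu'⟩
    have : s = ru := pvReach_unique hu' hu
    subst this
    exact hz
  · intro h
    exact ⟨ru, h, hu⟩

-- reach-preserving updates preserve the tree partition
theorem pvPres_rootEq {p q : List Nat} {n : Nat}
    (hpres : ∀ z s, z < n → (pvReach p z s ↔ pvReach q z s)) (z w : Nat) (hz : z < n)
    (hw : w < n) : pvRootEq p z w ↔ pvRootEq q z w :=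
  exists_congr fun s => and_congr (hpres z s hz) (hpres w s hw)

-- linking two roots merges exactly their two trees
theorem pvLink_rootEq {p : List Nat} {n a b : Nat} (hFr : pvFr p n) (ha : a < n) (hb : b < n)
    (hra : p.getD a a = a) (hrb : p.getD b b = b) (hab : a ≠ b) :
    ∀ z w, z < n → w < n → (pvRootEq (p.set b a) z w ↔
      (pvRootEq p z w ∨ ((pvReach p z a ∨ pvReach p z b) ∧ (pvReach p w a ∨ pvReach p w b)))) := by
  obtain ⟨hlen, hlt, hreach⟩ := hFr
  have hblen : b < p.length := by omega
  intro z w hz hw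
  constructor
  · rintro ⟨s, hzq, hwq⟩
    rcases pvLink_bwd hblen hra hrb hab z s hzq with ⟨hzp, _⟩ | ⟨hzb, hsa⟩
    · rcases pvLink_bwd hblen hra hrb hab w s hwq with ⟨hwp, _⟩ | ⟨hwb, hsa⟩
      · exact Or.inl ⟨s, hzp, hwp⟩
      · subst hsa
        exact Or.inr ⟨Or.inl hzp, Or.inr hwb⟩
    · rcases pvLink_bwd hblen hra hrb hab w s hwq with ⟨hwp, _⟩ | ⟨hwb, _⟩
      · subst hsa
        exact Or.inr ⟨Or.inr hzb, Or.inl hwp⟩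
      · exact Or.inl ⟨b, hzb, hwb⟩
  · rintro (⟨s, hzp, hwp⟩ | ⟨hza, hwa⟩)
    · by_cases hsb : s = b
      · subst hsb
        exact ⟨a, (pvLink_fwd hblen hra hrb hab z s hzp).2 rfl,
          (pvLink_fwd hblen hra hrb hab w s hwp).2 rfl⟩
      · exact ⟨s, (pvLink_fwd hblen hra hrb hab z s hzp).1 hsb,
          (pvLink_fwd hblen hra hrb hab w s hwp).1 hsb⟩
    · have hq : ∀ y, (pvReach p y a ∨ pvReach p y b) → pvReach (p.set b a) y a := by
        rintro y (hy | hy)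
        · exact (pvLink_fwd hblen hra hrb hab y a hy).1 hab
        · exact (pvLink_fwd hblen hra hrb hab y b hy).2 rfl
      exact ⟨a, hq z hza, hq w hwa⟩

-- relabelling cv to cu merges exactly the labels cu and cv
theorem pvLabel_merge (comp : List Nat) (n cu cv : Nat) (hlen : comp.length = n)
    (hne : cu ≠ cv) : ∀ z w, z < n → w < n →
    ((comp.map (fun c => if c = cv then cu else c)).getD z 0 =
        (comp.map (fun c => if c = cv then cu else c)).getD w 0 ↔
      (comp.getD z 0 = comp.getD w 0 ∨
        ((comp.getD z 0 = cu ∨ comp.getD z 0 = cv) ∧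
         (comp.getD w 0 = cu ∨ comp.getD w 0 = cv)))) := by
  intro z w hz hw
  have hmap : ∀ y, y < n → (comp.map (fun c => if c = cv then cu else c)).getD y 0 =
      (fun c => if c = cv then cu else c) (comp.getD y 0) := by
    intro y hy
    have hy' : y < comp.length := by omega
    rw [List.getD_eq_getElem?_getD, List.getElem?_map, List.getElem?_eq_getElem hy',
      List.getD_eq_getElem?_getD, List.getElem?_eq_getElem hy']
    rfl
  rw [hmap z hz, hmap w hw]
  simp only []
  split_ifs <;> omega

-- ---------- the loop invariant: union-find partition = label partition ----------

def pvRel (n : Nat) (p comp : List Nat) : Prop :=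
  pvFr p n ∧ comp.length = n ∧
  ∀ z w, z < n → w < n → (pvRootEq p z w ↔ comp.getD z 0 = comp.getD w 0)

theorem pvMSTloop (n : Nat) :
    ∀ (edges : List (Int × Nat × Nat)) (p rank comp : List Nat) (acc : List (Nat × Nat)),
    (∀ e ∈ edges, e.2.1 < n ∧ e.2.2 < n) → pvRel n p comp →
    (edges.foldl pvMSTstep (p, rank, acc)).2.2 = (edges.foldl pvMSTBstep (comp, acc)).2 := by
  intro edges
  induction edges with
  | nil => intro p rank comp acc _ _; rfl
  | cons e es ih =>
    intro p rank comp acc hE hRel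
    obtain ⟨w, u, v⟩ := e
    obtain ⟨hu, hv⟩ : u < n ∧ v < n := hE _ (List.mem_cons_self)
    obtain ⟨hFr, hclen, hpart⟩ := hRel
    have hplen : p.length = n := hFr.1
    -- roots of u and v in p
    obtain ⟨ru, hru⟩ := hFr.2.2 u hu
    obtain ⟨rv, hrv⟩ := hFr.2.2 v hv
    have hrun : ru < n := pvReach_lt hFr.2.1 hru hu
    have hrvn : rv < n := pvReach_lt hFr.2.1 hrv hv
    -- the two finds of the loop condition
    obtain ⟨hf1r, hf1len, hFr1, hpres1⟩ := pvFind_n hFr hu hru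
    set f1 := pvFind p.length p u with hf1def
    obtain ⟨hf2r, hf2len, hFr2, hpres2⟩ :=
      pvFind_n (p := f1.1) hFr1 hv ((hpres1 v rv hv).1 hrv)
    set f2 := pvFind f1.1.length f1.1 v with hf2def
    have hpres12 : ∀ z s, z < n → (pvReach p z s ↔ pvReach f2.1 z s) :=
      fun z s hz => (hpres1 z s hz).trans (hpres2 z s hz)
    -- the partition test of A equals the label test of B
    have hcond : ru = rv ↔ comp.getD u 0 = comp.getD v 0 := by
      rw [← hpart u v hu hv]
      constructor
      · intro h
        exact ⟨ru, hru, h ▸ hrv⟩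
      · rintro ⟨s, h1, h2⟩
        rw [← pvReach_unique h1 hru, ← pvReach_unique h2 hrv]
    rw [List.foldl_cons, List.foldl_cons]
    by_cases hne : ru = rv
    · -- edge rejected by both
      have hA : pvMSTstep (p, rank, acc) (w, u, v) = (f2.1, rank, acc) := by
        simp only [pvMSTstep]
        rw [← hf1def, ← hf2def, hf1r, hf2r, if_neg (show ¬ru ≠ rv from fun h => h hne)]
      have hB : pvMSTBstep (comp, acc) (w, u, v) = (comp, acc) := by
        simp only [pvMSTBstep]
        rw [if_neg (show ¬comp.getD u 0 ≠ comp.getD v 0 from fun h => h (hcond.1 hne))]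
      rw [hA, hB]
      refine ih f2.1 rank comp acc (fun e he => hE e (List.mem_cons_of_mem _ he)) ?_
      refine ⟨hFr2, hclen, ?_⟩
      intro z w' hz hw'
      rw [← pvPres_rootEq hpres12 z w' hz hw']
      exact hpart z w' hz hw'
    · -- edge accepted by both
      have hA : pvMSTstep (p, rank, acc) (w, u, v) =
          ((pvUnion f2.1 rank u v).1, (pvUnion f2.1 rank u v).2, acc ++ [(u, v)]) := by
        simp only [pvMSTstep]
        rw [← hf1def, ← hf2def, hf1r, hf2r, if_pos hne]
      have hcu : comp.getD u 0 ≠ comp.getD v 0 := fun h => hne (hcond.2 h)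
      have hB : pvMSTBstep (comp, acc) (w, u, v) =
          (comp.map (fun c => if c = comp.getD v 0 then comp.getD u 0 else c),
           acc ++ [(u, v)]) := by
        simp only [pvMSTBstep]
        rw [if_pos hcu]
      rw [hA, hB]
      -- the two finds inside pvUnion
      obtain ⟨hg1r, hg1len, hFrg1, hpresg1⟩ :=
        pvFind_n (p := f2.1) hFr2 hu ((hpres12 u ru hu).1 hru)
      set g1 := pvFind f2.1.length f2.1 u with hg1def
      obtain ⟨hg2r, hg2len, hFrg2, hpresg2⟩ :=
        pvFind_n (p := g1.1) hFrg1 hv ((hpresg1 v rv hv).1 ((hpres12 v rv hv).1 hrv))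
      set g2 := pvFind g1.1.length g1.1 v with hg2def
      have hpresg : ∀ z s, z < n → (pvReach p z s ↔ pvReach g2.1 z s) :=
        fun z s hz => (hpres12 z s hz).trans ((hpresg1 z s hz).trans (hpresg2 z s hz))
      -- the linked parent array, in both rank orientations
      have hun : (pvUnion f2.1 rank u v).1 = g2.1.set rv ru ∨
          (pvUnion f2.1 rank u v).1 = g2.1.set ru rv := by
        unfold pvUnion
        dsimp only
        rw [← hg1def, ← hg2def, hg1r, hg2r, if_pos hne]
        split_ifs with h1 h2
        · exact Or.inl rfl
        · exact Or.inr rfl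
        · exact Or.inl rfl
      -- the new parent array matches the relabelled component array
      have hroots_g2 : pvReach g2.1 u ru ∧ pvReach g2.1 v rv :=
        ⟨(hpresg u ru hu).1 hru, (hpresg v rv hv).1 hrv⟩
      have hrootu : g2.1.getD ru ru = ru := pvReach_isRoot hroots_g2.1
      have hrootv : g2.1.getD rv rv = rv := pvReach_isRoot hroots_g2.2
      have hreach_iff : ∀ z, z < n →
          ((pvReach g2.1 z ru ↔ comp.getD z 0 = comp.getD u 0) ∧
           (pvReach g2.1 z rv ↔ comp.getD z 0 = comp.getD v 0)) := by
        intro z hz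
        constructor
        · rw [← (hpresg z ru hz), ← pvRootEq_iff_reach hru z]
          exact hpart z u hz hu
        · rw [← (hpresg z rv hz), ← pvRootEq_iff_reach hrv z]
          exact hpart z v hz hv
      have hRel' : ∀ q : List Nat, (q = g2.1.set rv ru ∨ q = g2.1.set ru rv) →
          pvRel n q (comp.map (fun c => if c = comp.getD v 0 then comp.getD u 0 else c)) := by
        intro q hq
        have hFr' : pvFr q n := by
          rcases hq with rfl | rfl
          · exact pvLink_Fr hFrg2 hrun hrvn hrootu hrootv hne
          · exact pvLink_Fr hFrg2 hrvn hrun hrootv hrootu (Ne.symm hne)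
        refine ⟨hFr', by simpa using hclen, ?_⟩
        intro z w' hz hw'
        have hchar : pvRootEq q z w' ↔
            (pvRootEq g2.1 z w' ∨
              ((pvReach g2.1 z ru ∨ pvReach g2.1 z rv) ∧
               (pvReach g2.1 w' ru ∨ pvReach g2.1 w' rv))) := by
          rcases hq with rfl | rfl
          · exact pvLink_rootEq hFrg2 hrun hrvn hrootu hrootv hne z w' hz hw'
          · rw [pvLink_rootEq hFrg2 hrvn hrun hrootv hrootu (Ne.symm hne) z w' hz hw']
            constructor
            · rintro (h | ⟨h1, h2⟩)
              · exact Or.inl h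
              · exact Or.inr ⟨h1.symm, h2.symm⟩
            · rintro (h | ⟨h1, h2⟩)
              · exact Or.inl h
              · exact Or.inr ⟨h1.symm, h2.symm⟩
        rw [hchar]
        rw [pvLabel_merge comp n (comp.getD u 0) (comp.getD v 0) hclen hcu z w' hz hw']
        rw [← pvPres_rootEq hpresg z w' hz hw']
        rw [hpart z w' hz hw']
        rw [(hreach_iff z hz).1, (hreach_iff z hz).2,
          (hreach_iff w' hw').1, (hreach_iff w' hw').2]
      rcases hun with hq | hq
      · refine ih _ (pvUnion f2.1 rank u v).2 _ (acc ++ [(u, v)])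
          (fun e he => hE e (List.mem_cons_of_mem _ he)) ?_
        rw [hq]
        exact hRel' _ (Or.inl rfl)
      · refine ih _ (pvUnion f2.1 rank u v).2 _ (acc ++ [(u, v)])
          (fun e he => hE e (List.mem_cons_of_mem _ he)) ?_
        rw [hq]
        exact hRel' _ (Or.inr rfl)

-- (range n).getD z z = z for every z (in range by lookup, out of range by default)
theorem pvRange_getD (n z : Nat) : (List.range n).getD z z = z := by
  rcases Nat.lt_or_ge z n with h | h
  · rw [List.getD_eq_getElem?_getD, List.getElem?_range h]
    rfl
  · rw [List.getD_eq_getElem?_getD,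
      List.getElem?_eq_none_iff.mpr (by simpa using h)]
    rfl

theorem pvReach_range {n z s : Nat} (h : pvReach (List.range n) z s) : s = z := by
  cases h with
  | root _ _ => rfl
  | step _ _ hne _ => exact absurd (pvRange_getD n z) hne

theorem pvMSTeq (n : Nat) (edges : List (Int × Nat × Nat))
    (hE : ∀ e ∈ edges, e.2.1 < n ∧ e.2.2 < n) : pvMST edges n = pvMSTB edges n := by
  unfold pvMST pvMSTB
  refine pvMSTloop n edges _ _ _ [] hE ⟨⟨List.length_range, ?_, ?_⟩, List.length_range, ?_⟩
  · intro z hz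
    rw [pvRange_getD]
    exact hz
  · intro z _
    exact ⟨z, pvReach.root z (pvRange_getD n z)⟩
  · intro z w hz hw
    have hg : ∀ y, y < n → (List.range n).getD y 0 = y := by
      intro y hy
      rw [List.getD_eq_getElem?_getD, List.getElem?_range hy]
      rfl
    rw [hg z hz, hg w hw]
    constructor
    · rintro ⟨s, h1, h2⟩
      rw [← pvReach_range h1, ← pvReach_range h2]
    · intro h
      subst h
      exact ⟨z, pvReach.root z (pvRange_getD n z), pvReach.root z (pvRange_getD n z)⟩

-- ---------- DFS, cost and edge-building equalities (as before) ----------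

-- the iterative DFS consumes the head segment of its stack exactly like the recursive preorder
theorem pvDfsEq (adj : List (List Nat)) :
    ∀ (k : Nat) (ns : List Nat) (v : List Bool) (t stack : List Nat), v.count false ≤ k →
      pvDfsIter adj (ns ++ stack) v t =
        pvDfsIter adj stack (pvPreorder adj ns v t).1.1 (pvPreorder adj ns v t).1.2 := by
  intro k
  induction k with
  | zero =>
    intro ns
    induction ns with
    | nil => intro v t stack _; simp [pvPreorder]
    | cons n rest ih =>
      intro v t stack hk
      have hvis : v.getD n true = true := by
        cases hg : v.getD n true
        · have := pvCountFalseSetTrue v n hg; omega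
        · rfl
      rw [List.cons_append, pvDfsIter, pvPreorder]
      rw [dif_pos hvis, dif_neg (by simp only [hvis]; simp)]
      exact ih v t stack hk
  | succ k ihk =>
    intro ns
    induction ns with
    | nil => intro v t stack _; simp [pvPreorder]
    | cons n rest ih =>
      intro v t stack hk
      rw [List.cons_append, pvDfsIter, pvPreorder]
      by_cases h : v.getD n true = false
      · rw [dif_neg (by simp only [h]; simp), dif_pos h]
        dsimp only
        have h1 : (v.set n true).count false ≤ k := by
          have := pvCountFalseSetTrue v n h; omega
        rw [ihk (adj.getD n []) (v.set n true) (t ++ [n]) (rest ++ stack) h1]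
        exact ih _ _ stack
          (le_trans (le_trans (pvPreorder adj (adj.getD n []) (v.set n true) (t ++ [n])).2 h1)
            (Nat.le_succ k))
      · have hvis : v.getD n true = true := by
          cases hg : v.getD n true
          · exact absurd hg h
          · rfl
        rw [dif_pos hvis, dif_neg (by simp only [hvis]; simp)]
        exact ih v t stack hk

-- index-based pair fold over a list equals the fold over zipped consecutive pairs
theorem pvPairsEq (f : Nat → Nat → Int) :
    ∀ (l : List Nat),
      (List.range (l.length - 1)).map (fun i => f (l.getD i 0) (l.getD (i + 1) 0)) =
        (l.zip (l.drop 1)).map (fun p => f p.1 p.2) := by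
  intro l
  induction l with
  | nil => simp
  | cons a rest ih =>
    cases rest with
    | nil => simp
    | cons b r =>
      simp only [List.length_cons, Nat.add_sub_cancel, List.range_succ_eq_map, List.map_cons,
        List.map_map, List.drop_succ_cons, List.drop_zero, List.zip_cons_cons]
      refine congrArg₂ List.cons rfl ?_
      have := ih
      simp only [List.length_cons, Nat.add_sub_cancel, List.drop_succ_cons,
        List.drop_zero] at this
      rw [← this]
      apply List.map_congr_left
      intro i _
      rfl

theorem pvCostEq (dm : List (List Int)) (l : List Nat) :
    (List.range (l.length - 1)).foldl
        (fun acc i => acc + pvW dm (l.getD i 0) (l.getD (i + 1) 0)) 0 =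
      (l.zip (l.drop 1)).foldl (fun acc p => acc + pvW dm p.1 p.2) 0 := by
  rw [PySem.List.foldl_add (l := List.range (l.length - 1))
        (g := fun i => pvW dm (l.getD i 0) (l.getD (i + 1) 0)) (a := 0),
      PySem.List.foldl_add (l := l.zip (l.drop 1)) (g := fun p => pvW dm p.1 p.2) (a := 0)]
  rw [pvPairsEq (pvW dm) l]

theorem pvEdgesEq (dm : List (List Int)) (n : Nat) :
    (List.range n).foldl
        (fun es i => (List.range' (i + 1) (n - (i + 1))).foldl
          (fun es j => es ++ [(pvW dm i j, i, j)]) es) [] =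
      (List.range n).flatMap
        (fun i => (List.range' (i + 1) (n - (i + 1))).map (fun j => (pvW dm i j, i, j))) := by
  simp only [PySem.List.foldl_append_singleton_eq_map]
  rw [PySem.List.foldl_append_eq_flatMap]
  simp

-- ===== VERDICT (by name: the statement is the Claim_ definition above) =====
theorem kruskal_tsp_spec : Claim_equal_kruskal_tsp := by
  intro dm _hdom _hpre
  show kruskal_tsp dm = kruskal_tsp_alt dm
  simp only [kruskal_tsp, kruskal_tsp_alt]
  rw [pvEdgesEq]
  have hEdges : ∀ e ∈ PySem.List.sorted
      ((List.range dm.length).flatMap (fun i => (List.range' (i + 1) (dm.length - (i + 1))).map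
        (fun j => (pvW dm i j, i, j)))) (fun e => e.1) false,
      e.2.1 < dm.length ∧ e.2.2 < dm.length := by
    intro e he
    rw [PySem.List.mem_sorted, List.mem_flatMap] at he
    obtain ⟨i, hi, he⟩ := he
    rw [List.mem_map] at he
    obtain ⟨j, hj, rfl⟩ := he
    rw [List.mem_range] at hi
    rw [List.mem_range'_1] at hj
    exact ⟨hi, by show j < dm.length; omega⟩
  rw [pvMSTeq dm.length _ hEdges]
  have htour := pvDfsEq (pvAdj dm.length (pvMSTB (PySem.List.sorted
      ((List.range dm.length).flatMap (fun i => (List.range' (i + 1) (dm.length - (i + 1))).map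
        (fun j => (pvW dm i j, i, j)))) (fun e => e.1) false) dm.length))
    ((List.replicate dm.length false).count false) [0]
    (List.replicate dm.length false) [] [] (le_refl _)
  simp only [List.append_nil] at htour
  rw [htour, pvDfsIter, pvCostEq]
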